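-- pv_equiv track=rewrite | github.com/CE-Walf/Algorithm-problem-solving | 프로그래머스/lv0/120835. 진료 순서 정하기/진료 순서 정하기.py | solution
-- ===== SOURCE A (Python) =====
-- def solution(emergency):
--     sorted_emergency = sorted(emergency)
--
--     for i in range(len(emergency)):
--         for element in sorted_emergency:
--             if emergency[i] == element:
--                 emergency[i] = len(emergency) - sorted_emergency.index(element)
--                 break
--
--     return emergency
-- ===== SOURCE B (Python) =====
-- def solution(emergency):
--     # Build value -> rank once from the sorted list, then one lookup pass.
--     # (A mutates its argument in place; B leaves it unchanged - return value is identical.)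
--     n = len(emergency)
--     rank = {}
--     for i, v in enumerate(sorted(emergency)):
--         rank.setdefault(v, n - i)
--     return [rank[v] for v in emergency]
-- ===== Notes on version B (the rewrite author's own statement) =====
-- stated objective: faster
-- what changed: Replaces A's nested scan (for each element, linear search of the sorted list plus a list.index call) by a value-to-rank dict built once from the sorted list with setdefault, followed by a single lookup pass; B also leaves the argument list unmutated while A overwrites it in place (return values identical).
import Mathlib
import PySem

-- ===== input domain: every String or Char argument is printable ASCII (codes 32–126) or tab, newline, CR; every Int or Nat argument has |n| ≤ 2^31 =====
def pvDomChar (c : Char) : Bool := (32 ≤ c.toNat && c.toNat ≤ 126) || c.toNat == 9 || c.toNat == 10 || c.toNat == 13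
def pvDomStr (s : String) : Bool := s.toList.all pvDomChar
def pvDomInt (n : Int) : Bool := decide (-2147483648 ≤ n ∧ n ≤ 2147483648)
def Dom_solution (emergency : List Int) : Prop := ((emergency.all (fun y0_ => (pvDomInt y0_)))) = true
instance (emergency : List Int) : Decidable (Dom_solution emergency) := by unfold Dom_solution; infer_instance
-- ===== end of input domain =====

-- B replaces A's quadratic scan-and-index loop by a value→rank dict built once from the
-- sorted list plus one lookup pass (asymptotically faster). A mutates its argument list in
-- place; B does not — the equivalence proved here is about the return value.

-- ===== PORT A =====
-- inner 'for element in sorted_emergency: if emergency[i] == element: … break' loop;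
-- '.index(element)' is PySem.List.index?; it is some here (element drawn from sorted_e),
-- the none branch (no assignment) mirrors the loop ending without a break.
def solutionInner (sorted_e : List Int) (n : Int) (x : Int) : List Int → Option Int
  | [] => none
  | e :: rest =>
    if x == e then (PySem.List.index? sorted_e e).map (fun k => n - (k : Int))
    else solutionInner sorted_e n x rest

def solution (emergency : List Int) : List Int :=
  let sorted_e := PySem.List.sorted emergency id
  (PySem.List.pyRange 0 (emergency.length : Int)).foldl
    (fun st i =>
      match PySem.List.pyGet? st i with
      | none => st
      | some x =>
        match solutionInner sorted_e (emergency.length : Int) x sorted_e with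
        | some v => st.set i.toNat v  -- emergency[i] = v; exact: i from range(len), 0 ≤ i < len st
        | none => st)
    emergency

-- ===== PORT B =====
def solution_alt (emergency : List Int) : List Int :=
  let n : Int := emergency.length
  let rank : PySem.Dict Int Int :=
    (PySem.List.enumerate (PySem.List.sorted emergency id)).foldl
      (fun d p => d.setdefault p.2 (n - p.1)) PySem.Dict.empty
  -- rank[v]: get? is some for every v ∈ emergency (every value is a key), so no KeyError
  emergency.map (fun v => (rank.get? v).getD 0)

-- ===== PRECONDITION & SPEC =====
def Spec_solution (emergency : List Int) (out : List Int) : Prop := out = solution_alt emergency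
instance (emergency : List Int) (out : List Int) : Decidable (Spec_solution emergency out) := by unfold Spec_solution; infer_instance

-- ===== CLAIM (what is proved, stated in full; the proofs are below) =====
def Claim_equal_solution : Prop := ∀ (emergency : List Int), Dom_solution emergency → Spec_solution emergency (solution emergency)

-- ===== LEMMAS AND PROOFS =====

-- the common value: rank of x = n - (first index of x in the ascending sorted list)
def rankOf (sorted_e : List Int) (n x : Int) : Int :=
  n - (((PySem.List.index? sorted_e x).getD 0 : Nat) : Int)

lemma setdefault_eq {κ ν : Type} [BEq κ] (d : PySem.Dict κ ν) (k : κ) (v : ν) :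
    d.setdefault k v = if d.contains k = true then d else d.insert k v := by
  by_cases h : d.contains k = true
  · simp [PySem.Dict.setdefault, h]
  · apply PySem.Dict.ext
    simp [PySem.Dict.setdefault, h,
      PySem.Dict.items_insert_of_not_contains d v (by simpa using h)]

lemma inner_spec (sorted_e : List Int) (n x : Int) (l : List Int) :
    solutionInner sorted_e n x l =
      if x ∈ l then (PySem.List.index? sorted_e x).map (fun k => n - (k : Int)) else none := by
  induction l with
  | nil => simp [solutionInner]
  | cons e rest ih =>
    by_cases h : x = e
    · subst h; simp [solutionInner]
    · simp [solutionInner, h, ih]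

lemma fold_setdefault_get? (l : List Int) (n : Int) (s : Int) (d : PySem.Dict Int Int) (v : Int) :
    ((PySem.List.enumerate l s).foldl (fun d p => d.setdefault p.2 (n - p.1)) d).get? v =
      match d.get? v with
      | some w => some w
      | none => (PySem.List.index? l v).map (fun k => n - (s + (k : Int))) := by
  induction l generalizing s d with
  | nil => cases h : d.get? v <;> simp [PySem.List.enumerate, h]
  | cons x t ih =>
    have hstep : PySem.List.enumerate (x :: t) s = (s, x) :: PySem.List.enumerate t (s + 1) := by
      simp [PySem.List.enumerate]
    rw [hstep]
    simp only [List.foldl_cons, ih]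
    rw [setdefault_eq]
    by_cases hx : v = x
    · subst hx
      by_cases hc : d.contains v = true
      · have : (d.get? v).isSome := by rw [← PySem.Dict.contains_eq_isSome_get?]; exact hc
        obtain ⟨w, hw⟩ := Option.isSome_iff_exists.mp this
        rw [PySem.List.index?_cons_self]
        simp [hc, hw]
      · have hnone : d.get? v = none := by
          cases h : d.get? v with
          | none => rfl
          | some w =>
            exfalso; apply hc
            rw [PySem.Dict.contains_eq_isSome_get?, h]; rfl
        rw [PySem.List.index?_cons_self]
        simp [hc, hnone, PySem.Dict.get?_insert_self]
    · have hne : x ≠ v := Ne.symm hx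
      rw [PySem.List.index?_cons_of_ne t hne]
      have hins : (d.insert x (n - s)).get? v = d.get? v :=
        PySem.Dict.get?_insert_of_ne d _ hx
      by_cases hc : d.contains x = true <;>
        simp only [hc, if_pos, if_neg, Bool.false_eq_true, not_false_iff, hins] <;>
        cases h : d.get? v with
        | some w => simp
        | none =>
          cases hk : PySem.List.index? t v with
          | none => simp
          | some k =>
            simp only [Option.map_some, Option.bind_some, Option.some.injEq,
              Option.bind_eq_bind, Option.pure_def]
            push_cast
            ring

lemma alt_eq_map_rankOf (emergency : List Int) :
    solution_alt emergency =
      emergency.map (rankOf (PySem.List.sorted emergency id) (emergency.length : Int)) := by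
  unfold solution_alt
  apply List.map_congr_left
  intro v hv
  have hmem : v ∈ PySem.List.sorted emergency id := by
    rw [PySem.List.mem_sorted]; exact hv
  obtain ⟨k, hk⟩ := Option.isSome_iff_exists.mp
    ((PySem.List.index?_isSome_iff _ _).mpr hmem)
  rw [fold_setdefault_get? _ _ 0 PySem.Dict.empty v]
  rw [PySem.List.index?_eq_idxOf?] at hk
  simp [rankOf, hk]

-- A's loop invariant: after processing indices < j, the list is map-rank on the prefix,
-- untouched on the suffix.
lemma a_loop_inv (emergency : List Int) (k : Nat) :
    ∀ j : Nat, j + k = emergency.length →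
      (PySem.List.pyRange (j : Int) (emergency.length : Int)).foldl
        (fun st i =>
          match PySem.List.pyGet? st i with
          | none => st
          | some x =>
            match solutionInner (PySem.List.sorted emergency id) (emergency.length : Int) x
                (PySem.List.sorted emergency id) with
            | some v => st.set i.toNat v
            | none => st)
        ((emergency.take j).map (rankOf (PySem.List.sorted emergency id) (emergency.length : Int))
          ++ emergency.drop j)
      = emergency.map (rankOf (PySem.List.sorted emergency id) (emergency.length : Int)) := by
  induction k with
  | zero =>
    intro j hj
    have hj' : j = emergency.length := by omega
    subst hj'
    rw [PySem.List.pyRange_one]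
    simp
  | succ k ih =>
    intro j hj
    have hjlt : j < emergency.length := by omega
    set se := PySem.List.sorted emergency id with hse
    set g := rankOf se (emergency.length : Int) with hg
    rw [PySem.List.pyRange_one_cons (by exact_mod_cast hjlt)]
    simp only [List.foldl_cons]
    have hlen : ((emergency.take j).map g).length = j := by
      simp [List.length_take]; omega
    have hget : PySem.List.pyGet? ((emergency.take j).map g ++ emergency.drop j) (j : Int)
        = some (emergency[j]'hjlt) := by
      rw [PySem.List.pyGet?_natCast]
      rw [List.getElem?_append_right (by omega)]
      rw [hlen]
      simp [List.getElem?_drop]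
    rw [hget]
    have hmem : emergency[j]'hjlt ∈ se := by
      rw [hse, PySem.List.mem_sorted]; exact List.getElem_mem hjlt
    obtain ⟨m, hm⟩ := Option.isSome_iff_exists.mp
      ((PySem.List.index?_isSome_iff _ _).mpr hmem)
    simp only [inner_spec] at ih ⊢
    simp only [hmem, if_pos, hm, Option.bind_eq_bind, Option.bind_some, Option.pure_def,
      Option.map_some]
    have hm' := hm
    rw [PySem.List.index?_eq_idxOf?] at hm'
    have hgval : g (emergency[j]'hjlt) = (emergency.length : Int) - (m : Int) := by
      simp [hg, rankOf, hm']
    have hset : (((emergency.take j).map g ++ emergency.drop j).set ((j : Int)).toNat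
          ((emergency.length : Int) - (m : Int)))
        = (emergency.take (j + 1)).map g ++ emergency.drop (j + 1) := by
      rw [Int.toNat_natCast]
      rw [List.set_append_right _ _ (by omega), hlen]
      have hdrop : emergency.drop j = emergency[j]'hjlt :: emergency.drop (j + 1) :=
        (List.drop_eq_getElem_cons hjlt)
      rw [hdrop]
      simp only [Nat.sub_self, List.set_cons_zero]
      have htake : List.take (j + 1) (List.map g emergency)
          = List.take j (List.map g emergency) ++ [g (emergency[j]'hjlt)] := by
        rw [List.take_add_one, List.getElem?_eq_getElem (by simpa using hjlt)]
        simp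
      simp [htake, hgval]
    rw [hset]
    have : ((j : Int) + 1) = ((j + 1 : Nat) : Int) := by push_cast; ring
    rw [this]
    exact ih (j + 1) (by omega)

-- ===== VERDICT (by name: the statement is the Claim_ definition above) =====
theorem solution_spec : Claim_equal_solution := by
  intro emergency _
  unfold Spec_solution
  rw [alt_eq_map_rankOf]
  have h := a_loop_inv emergency emergency.length 0 (by omega)
  simpa [solution] using h
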